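-- pv_equiv track=rewrite | github.com/CantLooseToAMoose/meta_ally | src/meta_ally/eval/evaluators.py | _count_tool_name_matches
-- ===== SOURCE A (Python) =====
-- def _count_tool_name_matches(expected_names: list[str], actual_names: list[str]) -> int:
--     """
--     Count how many expected tool names appear in actual tool names.
--
--     This handles cases where:
--     - Multiple calls to the same tool are expected
--     - Order of calls might differ
--
--     Returns:
--         Number of matching tool name occurrences.
--     """
--     expected_counts = {}
--     actual_counts = {}
--
--     # Count occurrences of each tool name
--     for name in expected_names:
--         expected_counts[name] = expected_counts.get(name, 0) + 1
--
--     for name in actual_names: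
--         actual_counts[name] = actual_counts.get(name, 0) + 1
--
--     # Count matches (minimum of expected and actual for each tool)
--     matches = 0
--     for tool_name, expected_count in expected_counts.items():
--         actual_count = actual_counts.get(tool_name, 0)
--         matches += min(expected_count, actual_count)
--
--     return matches
-- ===== SOURCE B (Python) =====
-- def _count_tool_name_matches(expected_names: list[str], actual_names: list[str]) -> int:
--     """Sort both lists and count multiset overlap with a two-pointer merge scan."""
--     e = sorted(expected_names)
--     a = sorted(actual_names)
--     i = j = matches = 0
--     while i < len(e) and j < len(a):
--         if e[i] == a[j]:
--             matches += 1
--             i += 1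
--             j += 1
--         elif e[i] < a[j]:
--             i += 1
--         else:
--             j += 1
--     return matches
-- ===== Notes on version B (the rewrite author's own statement) =====
-- stated objective: alternative
-- what changed: Replaces the two count dictionaries and the per-key min loop with sorting both lists and counting matches in a single two-pointer merge scan.
import Mathlib
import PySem

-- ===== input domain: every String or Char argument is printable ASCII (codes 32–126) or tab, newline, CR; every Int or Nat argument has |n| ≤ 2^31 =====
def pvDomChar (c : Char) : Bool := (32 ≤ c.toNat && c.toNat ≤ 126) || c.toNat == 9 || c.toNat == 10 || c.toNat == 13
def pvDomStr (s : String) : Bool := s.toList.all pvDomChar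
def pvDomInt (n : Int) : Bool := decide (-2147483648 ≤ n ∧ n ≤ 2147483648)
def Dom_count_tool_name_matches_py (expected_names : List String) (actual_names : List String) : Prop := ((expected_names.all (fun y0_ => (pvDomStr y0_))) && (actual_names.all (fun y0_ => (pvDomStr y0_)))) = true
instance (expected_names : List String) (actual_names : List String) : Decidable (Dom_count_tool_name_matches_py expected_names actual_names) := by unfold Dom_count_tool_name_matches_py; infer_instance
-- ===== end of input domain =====

-- ===== PORT A =====
-- B replaces A's two count dictionaries + per-key min loop with sort-both-lists and a two-pointer merge scan (same return value).
def count_tool_name_matches_py (expected_names : List String) (actual_names : List String) : Int :=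
  let expected_counts : PySem.Dict String Int := expected_names.foldl (fun d name => d.insert name (d.getD name 0 + 1)) PySem.Dict.empty
  let actual_counts : PySem.Dict String Int := actual_names.foldl (fun d name => d.insert name (d.getD name 0 + 1)) PySem.Dict.empty
  expected_counts.items.foldl (fun m p => m + min p.2 (actual_counts.getD p.1 0)) 0

-- ===== PORT B =====
-- the while-loop over indices i, j as the obvious structural recursion over the two list suffixes
def mergeCount : List String → List String → Int
  | [], _ => 0
  | _ :: _, [] => 0
  | x :: xs, y :: ys =>
      if x == y then 1 + mergeCount xs ys
      else if x < y then mergeCount xs (y :: ys)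
      else mergeCount (x :: xs) ys
  termination_by l1 l2 => l1.length + l2.length
  decreasing_by all_goals (simp; try omega)

def count_tool_name_matches_py_alt (expected_names : List String) (actual_names : List String) : Int :=
  mergeCount (PySem.List.sorted expected_names (fun s => s) false)
    (PySem.List.sorted actual_names (fun s => s) false)

-- ===== PRECONDITION & SPEC =====
def Spec_count_tool_name_matches_py (expected_names : List String) (actual_names : List String) (out : Int) : Prop := out = count_tool_name_matches_py_alt expected_names actual_names
instance (expected_names : List String) (actual_names : List String) (out : Int) : Decidable (Spec_count_tool_name_matches_py expected_names actual_names out) := by unfold Spec_count_tool_name_matches_py; infer_instance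

-- ===== CLAIM =====
def Claim_equal_count_tool_name_matches_py : Prop := ∀ (expected_names : List String) (actual_names : List String), Dom_count_tool_name_matches_py expected_names actual_names → Spec_count_tool_name_matches_py expected_names actual_names (count_tool_name_matches_py expected_names actual_names)

-- ===== LEMMAS AND PROOFS =====

theorem sum_map_eq_add_of_mem {α : Type} [DecidableEq α] (S : List α) (x : α) (c : Int)
    (f g : α → Int) (hS : S.Nodup) (hx : x ∈ S) (hfx : f x = g x + c)
    (hne : ∀ k ∈ S, k ≠ x → f k = g k) :
    (S.map f).sum = (S.map g).sum + c := by
  induction S with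
  | nil => cases hx
  | cons y rest ih =>
      simp only [List.map_cons, List.sum_cons]
      rcases List.mem_cons.mp hx with rfl | hx'
      · have : ∀ k ∈ rest, f k = g k := by
          intro k hk
          exact hne k (List.mem_cons_of_mem _ hk) (fun h => (List.nodup_cons.mp hS).1 (h ▸ hk))
        rw [hfx, List.map_congr_left this]; ring
      · have hyx : y ≠ x := fun h => (List.nodup_cons.mp hS).1 (h ▸ hx')
        rw [hne y (List.mem_cons_self) hyx,
          ih (List.nodup_cons.mp hS).2 hx' (fun k hk hk' => hne k (List.mem_cons_of_mem _ hk) hk')]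
        ring

theorem count_eq_zero_of_lt_head (x y : String) (ys : List String)
    (h2 : (y :: ys).Pairwise (· ≤ ·)) (hxy : x < y) : (y :: ys).count x = 0 := by
  rw [List.count_eq_zero]
  intro hmem
  rcases List.mem_cons.mp hmem with rfl | h
  · exact absurd hxy (lt_irrefl x)
  · exact absurd hxy (not_lt_of_ge ((List.pairwise_cons.mp h2).1 x h))

theorem mergeCount_eq_sum (l1 l2 : List String) (S : List String)
    (h1 : l1.Pairwise (· ≤ ·)) (h2 : l2.Pairwise (· ≤ ·))
    (hS : S.Nodup) (h0 : ∀ k, k ∉ S → l1.count k = 0) :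
    mergeCount l1 l2 = (S.map (fun k => min ((l1.count k : Int)) ((l2.count k : Int)))).sum := by
  match l1, l2 with
  | [], l2 =>
      have : ∀ k ∈ S, min (((List.nil).count k : Int)) ((l2.count k : Int)) = 0 := by
        intro k _; simp
      rw [List.map_congr_left this]
      simp [mergeCount]
  | x :: xs, [] =>
      have : ∀ k ∈ S, min (((x :: xs).count k : Int)) (((List.nil).count k : Int)) = 0 := by
        intro k _; simp
      rw [List.map_congr_left this]
      simp [mergeCount]
  | x :: xs, y :: ys =>
      have hxS : x ∈ S := by
        by_contra hx
        have := h0 x hx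
        rw [List.count_cons_self] at this
        omega
      rw [mergeCount]
      by_cases hxy : x = y
      · subst hxy
        rw [if_pos (by simp)]
        have hrec := mergeCount_eq_sum xs ys S
          (List.pairwise_cons.mp h1).2 (List.pairwise_cons.mp h2).2 hS
          (fun k hk => by
            have := h0 k hk
            have hkx : k ≠ x := fun he => hk (he ▸ hxS)
            simpa [List.count_cons, Ne.symm hkx] using this)
        rw [hrec]
        have hs := sum_map_eq_add_of_mem S x 1
          (fun k => min (((x :: xs).count k : Int)) (((x :: ys).count k : Int)))
          (fun k => min ((xs.count k : Int)) ((ys.count k : Int)))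
          hS hxS
          (by simp only [List.count_cons_self]; push_cast; omega)
          (by intro k _ hkx
              simp [Ne.symm hkx])
        rw [hs]; ring
      · rw [if_neg (by simpa using hxy)]
        by_cases hlt : x < y
        · rw [if_pos hlt]
          have hx2 : (y :: ys).count x = 0 := count_eq_zero_of_lt_head x y ys h2 hlt
          have hrec := mergeCount_eq_sum xs (y :: ys) S
            (List.pairwise_cons.mp h1).2 h2 hS
            (fun k hk => by
              have := h0 k hk
              have hkx : k ≠ x := fun he => hk (he ▸ hxS)
              simpa [List.count_cons, Ne.symm hkx] using this)
          rw [hrec]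
          refine congrArg List.sum (List.map_congr_left ?_)
          intro k _
          by_cases hkx : k = x
          · subst hkx
            rw [hx2]
            simp
            positivity
          · simp [List.count_cons, Ne.symm hkx]
        · rw [if_neg hlt]
          have hyx : y < x := lt_of_le_of_ne (le_of_not_gt hlt) (Ne.symm hxy)
          have hy1 : (x :: xs).count y = 0 := count_eq_zero_of_lt_head y x xs h1 hyx
          have hrec := mergeCount_eq_sum (x :: xs) ys S h1 (List.pairwise_cons.mp h2).2 hS h0
          rw [hrec]
          refine congrArg List.sum (List.map_congr_left ?_)
          intro k _
          by_cases hky : k = y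
          · subst hky
            rw [hy1]
            simp
            positivity
          · simp [List.count_cons, Ne.symm hky]
  termination_by l1.length + l2.length
  decreasing_by all_goals (simp; try omega)

theorem counter_getD (l : List String) (v : String) :
    (l.foldl (fun d name => d.insert name (d.getD name 0 + 1)) PySem.Dict.empty).getD v 0
      = (l.count v : Int) := by
  rw [PySem.Dict.getD_foldl_insert_add_one]
  simp [PySem.Dict.getD_empty]

-- ===== VERDICT =====
theorem count_tool_name_matches_py_spec : Claim_equal_count_tool_name_matches_py := by
  intro e a _
  unfold Spec_count_tool_name_matches_py
  simp only [count_tool_name_matches_py, count_tool_name_matches_py_alt]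
  set ec : PySem.Dict String Int := e.foldl (fun d name => d.insert name (d.getD name 0 + 1)) PySem.Dict.empty with hec
  have hnd : ec.keys.Nodup := PySem.Dict.nodup_keys_foldl_insert _ _ _ PySem.Dict.nodup_keys_empty
  have h0 : ∀ k, k ∉ ec.keys → e.count k = 0 := by
    intro k hk
    have : ec.getD k 0 = 0 := by
      refine PySem.Dict.getD_of_not_contains _ _ ?_
      rw [← Bool.not_eq_true, PySem.Dict.contains_iff_mem_keys]
      exact hk
    rw [hec, counter_getD] at this
    exact_mod_cast this
  have hpe := PySem.List.sorted_perm e (fun s : String => s) false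
  have hpa := PySem.List.sorted_perm a (fun s : String => s) false
  have h0s : ∀ k, k ∉ ec.keys → (PySem.List.sorted e (fun s : String => s) false).count k = 0 := by
    intro k hk; rw [hpe.count_eq]; exact h0 k hk
  rw [mergeCount_eq_sum _ _ ec.keys
    (PySem.List.sorted_pairwise e (fun s : String => s))
    (PySem.List.sorted_pairwise a (fun s : String => s)) hnd h0s]
  simp only [PySem.List.foldl_add]
  rw [PySem.Dict.items_eq_map_keys ec hnd 0, List.map_map]
  rw [zero_add]
  refine congrArg List.sum (List.map_congr_left ?_)
  intro k _
  simp [Function.comp, counter_getD, hec, hpe.count_eq, hpa.count_eq]
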